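-- pv_equiv track=rewrite | github.com/thekogami/Alocacao_de_Arquivos | main.py | desfragmentar_disco
-- ===== SOURCE A (Python) =====
-- def criar_disco(tamanho):
--     return [''] * tamanho
--
-- def desfragmentar_disco(disco):
--     novo_disco = criar_disco(len(disco))
--     indice_atual = 0
--     for bloco in disco:
--         if bloco != '':
--             novo_disco[indice_atual] = bloco
--             indice_atual += 1
--     return novo_disco
-- ===== SOURCE B (Python) =====
-- def desfragmentar_disco(disco):
--     return sorted(disco, key=lambda bloco: bloco == '')
-- ===== Notes on version B (the rewrite author's own statement) =====
-- stated objective: idiomatic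
-- what changed: Replaces A's preallocate-and-fill pass with an explicit write index by a one-line stable sort on the key 'block is empty', which keeps non-empty blocks in order at the front and moves empties to the tail.
import Mathlib
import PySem

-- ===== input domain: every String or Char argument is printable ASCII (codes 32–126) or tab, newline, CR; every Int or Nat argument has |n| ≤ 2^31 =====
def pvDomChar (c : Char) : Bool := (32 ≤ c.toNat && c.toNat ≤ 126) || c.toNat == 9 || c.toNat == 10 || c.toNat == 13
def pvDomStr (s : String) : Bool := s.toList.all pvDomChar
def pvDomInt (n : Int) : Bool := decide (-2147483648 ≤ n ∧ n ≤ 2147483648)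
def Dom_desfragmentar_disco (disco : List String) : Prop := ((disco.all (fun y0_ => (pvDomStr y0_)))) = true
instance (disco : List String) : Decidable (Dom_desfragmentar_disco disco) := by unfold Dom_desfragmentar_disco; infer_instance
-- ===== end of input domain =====

-- B replaces A's preallocate-and-fill pass (write index into a fresh disk) by a one-line
-- stable sort on the key "block is empty" (same result; objective: idiomatic, not faster).


-- ===== PORT A =====
def criar_disco (tamanho : Int) : List String := List.replicate tamanho.toNat ""

-- the assignment novo_disco[indice_atual] = bloco is List.set: indice_atual is always
-- in range (it counts the non-empty blocks seen so far, < len(disco)), so Python never raises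
def desfragmentar_disco (disco : List String) : List String :=
  (disco.foldl
    (fun (st : List String × Nat) bloco =>
      if bloco ≠ "" then (st.1.set st.2 bloco, st.2 + 1) else st)
    (criar_disco (disco.length : Int), 0)).1

-- ===== PORT B =====
def desfragmentar_disco_alt (disco : List String) : List String :=
  PySem.List.sorted disco (fun bloco => bloco == "")

-- ===== PRECONDITION & SPEC =====
def Spec_desfragmentar_disco (disco : List String) (out : List String) : Prop := out = desfragmentar_disco_alt disco
instance (disco : List String) (out : List String) : Decidable (Spec_desfragmentar_disco disco out) := by unfold Spec_desfragmentar_disco; infer_instance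

-- ===== CLAIM (what is proved, stated in full; the proofs are below) =====
def Claim_equal_desfragmentar_disco : Prop := ∀ (disco : List String), Dom_desfragmentar_disco disco → Spec_desfragmentar_disco disco (desfragmentar_disco disco)

-- ===== LEMMAS AND PROOFS =====

-- the comparator of B's sort, named for the proofs
def pvBefore (a b : String) : Bool := decide ((a == "") < (b == ""))

-- inserting a non-empty block into (non-empties ++ empties) lands between the two parts
theorem pv_insert_nonempty (x : String) (hx : (x == "") = false) :
    ∀ (ne e : List String), (∀ y ∈ ne, (y == "") = false) → (∀ y ∈ e, (y == "") = true) →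
      PySem.List.insertBy pvBefore x (ne ++ e) = ne ++ x :: e := by
  intro ne
  induction ne with
  | nil =>
    intro e _ he
    cases e with
    | nil => simp [PySem.List.insertBy]
    | cons y ys =>
      have hy : (y == "") = true := he y (by simp)
      simp [PySem.List.insertBy, pvBefore, hx, hy]
  | cons a ne ih =>
    intro e hne he
    have ha : (a == "") = false := hne a (by simp)
    simp only [List.cons_append, PySem.List.insertBy, pvBefore, hx, ha]
    simp only [Bool.lt_iff, decide_eq_true_eq]
    rw [if_neg (by simp)]
    exact congrArg (List.cons a) (ih e (fun y hy => hne y (by simp [hy])) he)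

-- B's insertion-sort fold keeps the state partitioned: non-empties (in order) then empties
theorem pv_fold_partition :
    ∀ (xs ne e : List String), (∀ y ∈ ne, (y == "") = false) → (∀ y ∈ e, (y == "") = true) →
      xs.foldl (fun acc x => PySem.List.insertBy pvBefore x acc) (ne ++ e)
        = (ne ++ xs.filter (fun y => !(y == ""))) ++ (e ++ xs.filter (fun y => y == "")) := by
  intro xs
  induction xs with
  | nil => intro ne e _ _; simp
  | cons x xs ih =>
    intro ne e hne he
    by_cases hx : (x == "") = true
    · have hstep : PySem.List.insertBy pvBefore x (ne ++ e) = (ne ++ e) ++ [x] := by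
        apply PySem.List.insertBy_of_forall_not_before
        intro y _
        simp [pvBefore, hx, Bool.lt_iff]
      simp only [List.foldl_cons, hstep, List.append_assoc]
      rw [show ne ++ (e ++ [x]) = ne ++ (e ++ [x]) from rfl]
      have := ih ne (e ++ [x]) hne (by
        intro y hy
        rcases List.mem_append.1 hy with h | h
        · exact he y h
        · simp at h; simp [h, hx])
      rw [← List.append_assoc] at this ⊢
      rw [this]
      simp [hx]
    · have hx' : (x == "") = false := by simpa using hx
      have hstep := pv_insert_nonempty x hx' ne e hne he
      simp only [List.foldl_cons, hstep]
      have := ih (ne ++ [x]) e (by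
        intro y hy
        rcases List.mem_append.1 hy with h | h
        · exact hne y h
        · simp at h; simp [h, hx']) he
      rw [show ne ++ x :: e = (ne ++ [x]) ++ e by simp] at *
      rw [this]
      simp [hx']

-- B's result: non-empty blocks in order, then the empty blocks
theorem pv_alt_eq (disco : List String) :
    desfragmentar_disco_alt disco
      = disco.filter (fun y => !(y == "")) ++ disco.filter (fun y => y == "") := by
  have h := pv_fold_partition disco [] [] (by simp) (by simp)
  simpa [desfragmentar_disco_alt, PySem.List.sorted_eq_foldl_insertBy, pvBefore] using h

-- every empty-filtered block is "", so that filter is a replicate of its length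
theorem pv_filter_empty_eq_replicate (xs : List String) :
    xs.filter (fun y => y == "") = List.replicate (xs.filter (fun y => y == "")).length "" := by
  induction xs with
  | nil => rfl
  | cons x xs ih =>
    by_cases hx : (x == "") = true
    · rw [show x = "" from by simpa using hx]
      simp only [List.filter_cons, beq_self_eq_true, if_pos, List.length_cons]
      rw [List.replicate_succ]
      exact congrArg (List.cons "") ih
    · rw [List.filter_cons_of_neg (by simp [hx])]
      exact ih

-- A's fill loop: starting from acc (already filled, index = acc.length) and m empty slots,
-- it produces acc ++ (non-empties of xs) ++ remaining empty slots
theorem pv_fillA :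
    ∀ (xs acc : List String) (m : Nat), (xs.filter (fun y => !(y == ""))).length ≤ m →
      (xs.foldl
        (fun (st : List String × Nat) bloco =>
          if bloco ≠ "" then (st.1.set st.2 bloco, st.2 + 1) else st)
        (acc ++ List.replicate m "", acc.length)).1
      = acc ++ xs.filter (fun y => !(y == "")) ++ List.replicate (m - (xs.filter (fun y => !(y == ""))).length) "" := by
  intro xs
  induction xs with
  | nil =>
    intro acc m _
    simp only [List.foldl_nil, List.filter_nil, List.length_nil, Nat.sub_zero,
      List.append_nil]
  | cons x xs ih =>
    intro acc m hm
    by_cases hx : x = ""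
    · simp only [List.foldl_cons, if_neg (not_not_intro hx)]
      have := ih acc m (by simpa [List.filter_cons, hx] using hm)
      simpa [List.filter_cons, hx] using this
    · have hxb : (!(x == "")) = true := by simp [hx]
      have hlen : (xs.filter (fun y => !(y == ""))).length + 1 ≤ m := by
        simpa [List.filter_cons, hxb] using hm
      obtain ⟨m', rfl⟩ : ∃ m', m = m' + 1 := ⟨m - 1, by omega⟩
      have hset : (acc ++ List.replicate (m' + 1) "").set acc.length x
          = (acc ++ [x]) ++ List.replicate m' "" := by
        simp [List.replicate_succ]
      simp only [List.foldl_cons, if_pos hx, hset]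
      have := ih (acc ++ [x]) m' (by omega)
      simp only [List.length_append, List.length_cons, List.length_nil] at this
      simpa [List.filter_cons, hxb, List.append_assoc] using this

-- A's result in closed form
theorem pv_A_eq (disco : List String) :
    desfragmentar_disco disco
      = disco.filter (fun y => !(y == "")) ++ List.replicate (disco.length - (disco.filter (fun y => !(y == ""))).length) "" := by
  have h := pv_fillA disco [] disco.length (List.length_filter_le _ _)
  simpa [desfragmentar_disco, criar_disco] using h

-- ===== VERDICT (by name: the statement is the Claim_ definition above) =====
theorem desfragmentar_disco_spec : Claim_equal_desfragmentar_disco := by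
  intro disco _
  show desfragmentar_disco disco = desfragmentar_disco_alt disco
  rw [pv_A_eq, pv_alt_eq]
  congr 1
  rw [pv_filter_empty_eq_replicate]
  congr 1
  have h := List.length_eq_length_filter_add (l := disco) (fun y => y == "")
  omega
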